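-- pv_equiv track=rewrite | github.com/DimaZadorozhnyy/Hillel_HomeWorks | hw_8_9/func.py | some_fun
-- ===== SOURCE A (Python) =====
-- def some_fun(string):
--     res_list = []
--     count = string.count('i') - string.count('d')
--     step = count
--     for i in range(string.count('s')):
--         count = count * step
--     res_list.append(count)
--     step = count
--     for i in range(string.count('o') - 1):
--         count = count * step
--         res_list.append(count)
--     return res_list
-- ===== SOURCE B (Python) =====
-- def some_fun(string):
--     v = (string.count('i') - string.count('d')) ** (string.count('s') + 1)
--     return [v ** p for p in range(1, max(string.count('o'), 1) + 1)]
-- ===== Notes on version B (the rewrite author's own statement) =====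
-- stated objective: simpler
-- what changed: B computes the base value once by closed-form exponentiation and builds the result as a comprehension of direct powers, eliminating both accumulation loops and the threaded running-product state.
import Mathlib
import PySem

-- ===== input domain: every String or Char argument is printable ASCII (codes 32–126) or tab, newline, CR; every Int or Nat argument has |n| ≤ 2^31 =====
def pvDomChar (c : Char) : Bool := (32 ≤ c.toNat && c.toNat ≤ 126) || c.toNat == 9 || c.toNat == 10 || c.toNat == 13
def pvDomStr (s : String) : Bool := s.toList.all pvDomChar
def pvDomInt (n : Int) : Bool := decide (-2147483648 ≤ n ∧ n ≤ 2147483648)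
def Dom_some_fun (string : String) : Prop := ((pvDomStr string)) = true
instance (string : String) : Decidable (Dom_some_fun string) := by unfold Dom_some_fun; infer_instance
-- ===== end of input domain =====

-- B replaces A's two running-product loops by one closed-form power and a list of direct powers (objective: simpler).


-- ===== PORT A =====
def some_fun (string : String) : List Int :=
  let count : Int := (PySem.Str.count string "i" : Int) - (PySem.Str.count string "d" : Int)
  let step := count
  let count := (PySem.List.pyRange 0 (PySem.Str.count string "s" : Int) 1).foldl
    (fun acc _ => acc * step) count
  let res_list : List Int := [] ++ [count]
  let step := count
  let st := (PySem.List.pyRange 0 ((PySem.Str.count string "o" : Int) - 1) 1).foldl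
    (fun (p : List Int × Int) _ => (p.1 ++ [p.2 * step], p.2 * step)) (res_list, count)
  st.1

-- ===== PORT B =====
def some_fun_alt (string : String) : List Int :=
  let v : Int := ((PySem.Str.count string "i" : Int) - (PySem.Str.count string "d" : Int))
                   ^ (PySem.Str.count string "s" + 1)
  (PySem.List.pyRange 1 ((max (PySem.Str.count string "o") 1 : Nat) + 1) 1).map
    (fun p => v ^ p.toNat)

-- ===== PRECONDITION & SPEC =====
def Spec_some_fun (string : String) (out : List Int) : Prop := out = some_fun_alt string
instance (string : String) (out : List Int) : Decidable (Spec_some_fun string out) := by unfold Spec_some_fun; infer_instance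

-- ===== CLAIM (what is proved, stated in full; the proofs are below) =====
def Claim_equal_some_fun : Prop := ∀ (string : String), Dom_some_fun string → Spec_some_fun string (some_fun string)

-- ===== LEMMAS AND PROOFS =====

-- A's first loop is a running product: it computes c * step^n.
lemma loop1_eq (step : Int) : ∀ (n : Nat) (c : Int),
    (PySem.List.pyRange 0 (n : Int) 1).foldl (fun acc _ => acc * step) c = c * step ^ n := by
  intro n
  induction n with
  | zero => intro c; simp [PySem.List.pyRange_one_eq_nil]
  | succ k ih =>
    intro c
    have h : PySem.List.pyRange 0 ((k : Int) + 1) 1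
        = PySem.List.pyRange 0 (k : Int) 1 ++ [(k : Int)] :=
      PySem.List.pyRange_one_succ_right (by positivity)
    push_cast
    rw [h, List.foldl_append, ih]
    simp [pow_succ, mul_assoc]

-- A's second loop appends successive products a*v, a*v^2, …
lemma loop2_eq (v : Int) : ∀ (n : Nat) (res0 : List Int) (a : Int),
    (PySem.List.pyRange 0 (n : Int) 1).foldl
      (fun (p : List Int × Int) _ => (p.1 ++ [p.2 * v], p.2 * v)) (res0, a)
    = (res0 ++ (List.range n).map (fun k => a * v ^ (k + 1)), a * v ^ n) := by
  intro n
  induction n with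
  | zero => intro res0 a; simp [PySem.List.pyRange_one_eq_nil]
  | succ k ih =>
    intro res0 a
    have h : PySem.List.pyRange 0 ((k : Int) + 1) 1
        = PySem.List.pyRange 0 (k : Int) 1 ++ [(k : Int)] :=
      PySem.List.pyRange_one_succ_right (by positivity)
    push_cast
    rw [h, List.foldl_append, ih]
    simp [List.range_succ, pow_succ, mul_assoc]

-- B's comprehension over range(1, m+1) is the list of powers v^1 … v^m.
lemma alt_eq (v : Int) (m : Nat) :
    (PySem.List.pyRange 1 ((m : Int) + 1) 1).map (fun p => v ^ p.toNat)
    = (List.range m).map (fun k => v ^ (k + 1)) := by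
  rw [PySem.List.pyRange_one]
  have h2 : ((m : Int) + 1 - 1).toNat = m := by omega
  rw [h2, List.map_map]
  apply List.map_congr_left
  intro k hk
  simp only [Function.comp]
  congr 1
  omega

-- Core identity on the three counts.
lemma core (c : Int) (s o : Nat) :
    c ^ (s + 1) ::
      (List.range (((o : Int) - 1).toNat)).map (fun k => c ^ (s + 1) * (c ^ (s + 1)) ^ (k + 1))
    = (List.range (max o 1)).map (fun k => (c ^ (s + 1)) ^ (k + 1)) := by
  set v := c ^ (s + 1) with hv
  rcases Nat.eq_zero_or_pos o with h0 | hpos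
  · subst h0; simp
  · have hmax : max o 1 = o := by omega
    have hto : ((o : Int) - 1).toNat = o - 1 := by omega
    rw [hmax, hto]
    obtain ⟨m, rfl⟩ : ∃ m, o = m + 1 := ⟨o - 1, by omega⟩
    rw [List.range_succ_eq_map]
    simp only [Nat.add_sub_cancel, List.map_cons, List.map_map]
    congr 1
    · exact (pow_one v).symm
    · apply List.map_congr_left
      intro k _
      simp only [Function.comp]
      rw [← pow_succ']

-- ===== VERDICT (by name: the statement is the Claim_ definition above) =====
theorem some_fun_spec : Claim_equal_some_fun := by
  intro string _
  unfold Spec_some_fun some_fun some_fun_alt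
  set ci := (PySem.Str.count string "i" : Int)
  set cd := (PySem.Str.count string "d" : Int)
  set s := PySem.Str.count string "s"
  set o := PySem.Str.count string "o"
  simp only
  rw [loop1_eq (ci - cd) s (ci - cd)]
  have hpow : (ci - cd) * (ci - cd) ^ s = (ci - cd) ^ (s + 1) := by
    rw [pow_succ']
  rw [hpow]
  have hr : PySem.List.pyRange 0 ((o : Int) - 1) 1
      = PySem.List.pyRange 0 (((((o : Int) - 1).toNat : Nat)) : Int) 1 := by
    by_cases h : (o : Int) - 1 ≤ 0
    · rw [PySem.List.pyRange_one_eq_nil h, PySem.List.pyRange_one_eq_nil (by omega)]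
    · congr 1; omega
  rw [hr, loop2_eq, alt_eq]
  simpa using core (ci - cd) s o
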